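-- pv_equiv track=rewrite | github.com/spasoje2001/testdatagen | testdatagen/strategies/combination.py | _pairs_covered_by_row
-- ===== SOURCE A (Python) =====
-- def _pairs_covered_by_row(row, field_names, uncovered):
--     """Count how many uncovered pairs a candidate row would cover."""
--     n_fields = len(field_names)
--     count = 0
--     for i in range(n_fields):
--         for j in range(i + 1, n_fields):
--             pair = (i, j, row[field_names[i]], row[field_names[j]])
--             if pair in uncovered:
--                 count += 1
--     return count
-- ===== SOURCE B (Python) =====
-- def _pairs_covered_by_row(row, field_names, uncovered):
--     """Count how many uncovered pairs a candidate row would cover."""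
--     n = len(field_names)
--     count = 0
--     for i, j, a, b in set(uncovered):
--         if 0 <= i < j < n and row.get(field_names[i]) == a and row.get(field_names[j]) == b:
--             count += 1
--     return count
-- ===== Notes on version B (the rewrite author's own statement) =====
-- stated objective: faster
-- what changed: Instead of enumerating all n^2/2 field-index pairs and scanning the uncovered list for each, B makes a single pass over set(uncovered) and checks each tuple's indices and row values directly.
-- crash fix: A raises KeyError when there are at least two field names and some field name is missing from row; B returns the count of matching uncovered tuples there (a missing name simply never matches). — e.g. on _pairs_covered_by_row([("a", "x")], (["a", "b"], [(0, 1, "x", "y")])): A raises KeyError, B returns 0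
import Mathlib
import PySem

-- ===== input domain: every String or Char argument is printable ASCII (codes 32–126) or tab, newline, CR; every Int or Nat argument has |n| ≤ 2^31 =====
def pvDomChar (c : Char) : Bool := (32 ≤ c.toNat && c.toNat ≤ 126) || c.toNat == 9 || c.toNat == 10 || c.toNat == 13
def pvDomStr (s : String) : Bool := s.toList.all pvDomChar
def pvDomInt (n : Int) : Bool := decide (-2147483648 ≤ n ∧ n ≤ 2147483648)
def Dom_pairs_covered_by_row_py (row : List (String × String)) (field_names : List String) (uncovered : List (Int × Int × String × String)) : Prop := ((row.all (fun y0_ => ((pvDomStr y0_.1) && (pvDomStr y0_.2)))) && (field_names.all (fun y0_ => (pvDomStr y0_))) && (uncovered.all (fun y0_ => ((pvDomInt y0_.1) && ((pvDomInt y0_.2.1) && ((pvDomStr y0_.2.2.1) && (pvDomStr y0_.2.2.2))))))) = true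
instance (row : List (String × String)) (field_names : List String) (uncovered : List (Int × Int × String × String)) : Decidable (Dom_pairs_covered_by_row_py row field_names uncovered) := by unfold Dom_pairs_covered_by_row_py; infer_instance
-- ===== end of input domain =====

-- B counts the covered pairs in a single pass over set(uncovered), checking each tuple's indices
-- and row values directly, instead of A's nested loop over all field-index pairs with a membership
-- scan of the uncovered list for each (objective: faster by algorithm; see claim).

-- ===== PORT A =====
-- row[name] (dict lookup, KeyError when missing) is ported as (Dict.get? …).getD "";
-- Pre_ excludes the missing-key inputs, so the "" default is never the value used.
-- field_names[i] is always in range here (i drawn from range(n_fields)).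
def pairs_covered_by_row_py (row : List (String × String)) (field_names : List String) (uncovered : List (Int × Int × String × String)) : Int :=
  let n_fields : Int := field_names.length
  (PySem.List.pyRange 0 n_fields 1).foldl (fun count i =>
    (PySem.List.pyRange (i + 1) n_fields 1).foldl (fun count j =>
      let pair : Int × Int × String × String :=
        (i, j, ((PySem.Dict.mk row).get? (PySem.List.pyGetD field_names i "")).getD "",
               ((PySem.Dict.mk row).get? (PySem.List.pyGetD field_names j "")).getD "")
      if pair ∈ uncovered then count + 1 else count) count) 0

-- ===== PORT B =====
-- One pass over set(uncovered); row.get(name) is Dict.get?, compared against the tuple's values.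
-- When the index guard fails the whole conjunction is false, matching Python's short-circuit `and`.
def pairs_covered_by_row_py_alt (row : List (String × String)) (field_names : List String) (uncovered : List (Int × Int × String × String)) : Int :=
  let n : Int := field_names.length
  (PySem.Set.ofList uncovered).foldl (fun count t =>
    if 0 ≤ t.1 ∧ t.1 < t.2.1 ∧ t.2.1 < n ∧
       (PySem.Dict.mk row).get? (PySem.List.pyGetD field_names t.1 "") = some t.2.2.1 ∧
       (PySem.Dict.mk row).get? (PySem.List.pyGetD field_names t.2.1 "") = some t.2.2.2
    then count + 1 else count) 0

-- ===== PRECONDITION & SPEC =====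
-- Pre_ excludes exactly the inputs where A raises KeyError: at least two field names and some
-- field name missing from row (with ≤ 1 field name A performs no lookup and returns 0).
def Pre_pairs_covered_by_row_py (row : List (String × String)) (field_names : List String) (uncovered : List (Int × Int × String × String)) : Prop :=
  field_names.length ≤ 1 ∨ ∀ s ∈ field_names, ((PySem.Dict.mk row).get? s).isSome = true
instance (row : List (String × String)) (field_names : List String) (uncovered : List (Int × Int × String × String)) : Decidable (Pre_pairs_covered_by_row_py row field_names uncovered) := by unfold Pre_pairs_covered_by_row_py; infer_instance
def pvWitness_pairs_covered_by_row_py : (List (String × String)) × List String × (List (Int × Int × String × String)) :=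
  ([("a", "x"), ("b", "y")], (["a", "b"], [(0, 1, "x", "y"), (1, 0, "y", "x")]))

-- A raises KeyError when at least two field names are given and some field name is not a key of row; B returns the count of matching uncovered tuples there (missing names simply never match).
def Raises_pairs_covered_by_row_py (row : List (String × String)) (field_names : List String) (uncovered : List (Int × Int × String × String)) : Prop :=
  2 ≤ field_names.length ∧ ∃ s ∈ field_names, (PySem.Dict.mk row).get? s = none
instance (row : List (String × String)) (field_names : List String) (uncovered : List (Int × Int × String × String)) : Decidable (Raises_pairs_covered_by_row_py row field_names uncovered) := by unfold Raises_pairs_covered_by_row_py; infer_instance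
def pvRaiseWitness_pairs_covered_by_row_py : (List (String × String)) × List String × (List (Int × Int × String × String)) :=
  ([("a", "x")], (["a", "b"], [(0, 1, "x", "y")]))
def pvRaiseWitnessOut_pairs_covered_by_row_py : Int := 0

def Spec_pairs_covered_by_row_py (row : List (String × String)) (field_names : List String) (uncovered : List (Int × Int × String × String)) (out : Int) : Prop := out = pairs_covered_by_row_py_alt row field_names uncovered
instance (row : List (String × String)) (field_names : List String) (uncovered : List (Int × Int × String × String)) (out : Int) : Decidable (Spec_pairs_covered_by_row_py row field_names uncovered out) := by unfold Spec_pairs_covered_by_row_py; infer_instance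

-- ===== CLAIM (what is proved, stated in full; the proofs are below) =====
def Claim_equal_pairs_covered_by_row_py : Prop := ∀ (row : List (String × String)) (field_names : List String) (uncovered : List (Int × Int × String × String)), Dom_pairs_covered_by_row_py row field_names uncovered → Pre_pairs_covered_by_row_py row field_names uncovered → Spec_pairs_covered_by_row_py row field_names uncovered (pairs_covered_by_row_py row field_names uncovered)
def Claim_raises_pairs_covered_by_row_py : Prop := (∀ (row : List (String × String)) (field_names : List String) (uncovered : List (Int × Int × String × String)), Dom_pairs_covered_by_row_py row field_names uncovered → Raises_pairs_covered_by_row_py row field_names uncovered → ¬ Pre_pairs_covered_by_row_py row field_names uncovered) ∧ (Dom_pairs_covered_by_row_py (pvRaiseWitness_pairs_covered_by_row_py.1) (pvRaiseWitness_pairs_covered_by_row_py.2.1) (pvRaiseWitness_pairs_covered_by_row_py.2.2) ∧ Raises_pairs_covered_by_row_py (pvRaiseWitness_pairs_covered_by_row_py.1) (pvRaiseWitness_pairs_covered_by_row_py.2.1) (pvRaiseWitness_pairs_covered_by_row_py.2.2) ∧ pairs_covered_by_row_py_alt (pvRaiseWitness_pairs_covered_by_row_py.1) (pvRaiseWitness_pairs_covered_by_row_py.2.1)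 (pvRaiseWitness_pairs_covered_by_row_py.2.2) = pvRaiseWitnessOut_pairs_covered_by_row_py)

-- ===== LEMMAS AND PROOFS =====

-- the value A reads for field index i (under Pre_ the .getD "" is never the fallback)
def pvVal (row : List (String × String)) (field_names : List String) (i : Int) : String :=
  ((PySem.Dict.mk row).get? (PySem.List.pyGetD field_names i "")).getD ""

-- the tuple A tests for indices i < j
def pvKey (row : List (String × String)) (field_names : List String) (i j : Int) : Int × Int × String × String :=
  (i, j, pvVal row field_names i, pvVal row field_names j)

-- B's per-tuple test (Bool, as Source B's condition)
def pvPred (row : List (String × String)) (field_names : List String) (t : Int × Int × String × String) : Bool :=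
  decide (0 ≤ t.1 ∧ t.1 < t.2.1 ∧ t.2.1 < (field_names.length : Int) ∧
    (PySem.Dict.mk row).get? (PySem.List.pyGetD field_names t.1 "") = some t.2.2.1 ∧
    (PySem.Dict.mk row).get? (PySem.List.pyGetD field_names t.2.1 "") = some t.2.2.2)

theorem pvPred_eq_true (row : List (String × String)) (field_names : List String) (t : Int × Int × String × String) :
    pvPred row field_names t = true ↔
      (0 ≤ t.1 ∧ t.1 < t.2.1 ∧ t.2.1 < (field_names.length : Int) ∧
       (PySem.Dict.mk row).get? (PySem.List.pyGetD field_names t.1 "") = some t.2.2.1 ∧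
       (PySem.Dict.mk row).get? (PySem.List.pyGetD field_names t.2.1 "") = some t.2.2.2) := by
  simp [pvPred]

-- the list of covered keys A's double loop enumerates
def pvCov (row : List (String × String)) (field_names : List String) (uncovered : List (Int × Int × String × String)) : List (Int × Int × String × String) :=
  (PySem.List.pyRange 0 (field_names.length : Int) 1).flatMap (fun i =>
    ((PySem.List.pyRange (i + 1) (field_names.length : Int) 1).filter
      (fun j => decide (pvKey row field_names i j ∈ uncovered))).map (pvKey row field_names i))

theorem pvA_eq_length (row : List (String × String)) (field_names : List String) (uncovered : List (Int × Int × String × String)) :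
    pairs_covered_by_row_py row field_names uncovered = ((pvCov row field_names uncovered).length : Int) := by
  unfold pairs_covered_by_row_py pvCov
  simp only [PySem.List.foldl_ite_add_one, PySem.List.foldl_add, zero_add,
    List.length_flatMap, List.length_map, List.countP_eq_length_filter]
  rw [Nat.cast_list_sum]
  simp only [pvKey, pvVal]
  rw [List.map_map]
  simp only [Function.comp_def]
  rfl

theorem pvB_eq_length (row : List (String × String)) (field_names : List String) (uncovered : List (Int × Int × String × String)) :
    pairs_covered_by_row_py_alt row field_names uncovered
      = ((((PySem.Set.ofList uncovered).filter (pvPred row field_names)).length : Nat) : Int) := by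
  unfold pairs_covered_by_row_py_alt
  simp only [← pvPred_eq_true]
  rw [PySem.List.foldl_if_add_one (pvPred row field_names)]
  simp only [zero_add, List.countP_eq_length_filter]

theorem pvCov_nodup (row : List (String × String)) (field_names : List String) (uncovered : List (Int × Int × String × String)) :
    (pvCov row field_names uncovered).Nodup := by
  unfold pvCov
  rw [List.nodup_flatMap]
  constructor
  · intro i _
    refine List.Nodup.map ?_ ((PySem.List.nodup_pyRange_one _ _).filter _)
    intro j j' h
    simpa [pvKey] using congrArg (fun t => t.2.1) h
  · refine (PySem.List.pairwise_lt_pyRange_one 0 _).imp ?_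
    intro i i' hlt t ht ht'
    simp only [List.mem_map] at ht ht'
    rcases ht with ⟨j, _, rfl⟩
    rcases ht' with ⟨j', _, hj'⟩
    have : i' = i := congrArg (fun t => t.1) hj'
    omega

theorem pvMem_equiv (row : List (String × String)) (field_names : List String) (uncovered : List (Int × Int × String × String))
    (hpre : Pre_pairs_covered_by_row_py row field_names uncovered) (t : Int × Int × String × String) :
    t ∈ pvCov row field_names uncovered ↔ t ∈ (PySem.Set.ofList uncovered).filter (pvPred row field_names) := by
  rw [List.mem_filter, PySem.Set.mem_ofList, pvPred_eq_true]
  unfold pvCov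
  simp only [List.mem_flatMap, List.mem_map, List.mem_filter, PySem.List.mem_pyRange_one,
    decide_eq_true_eq]
  constructor
  · rintro ⟨i, ⟨hi0, hin⟩, j, ⟨⟨hij, hjn⟩, hmem⟩, rfl⟩
    have hn2 : ¬ field_names.length ≤ 1 := by omega
    have hall := hpre.resolve_left (by exact_mod_cast fun h => hn2 (by exact_mod_cast h))
    refine ⟨hmem, ?_⟩
    have hlook : ∀ k : Int, 0 ≤ k → k < (field_names.length : Int) →
        (PySem.Dict.mk row).get? (PySem.List.pyGetD field_names k "") = some (pvVal row field_names k) := by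
      intro k hk0 hkn
      have hmemk : PySem.List.pyGetD field_names k "" ∈ field_names :=
        PySem.List.pyGetD_mem field_names "" (by constructor <;> omega)
      have := hall _ hmemk
      rcases Option.isSome_iff_exists.1 this with ⟨v, hv⟩
      simp [pvVal, hv]
    exact ⟨by simpa [pvKey] using hi0, by simpa [pvKey] using hij, by simpa [pvKey] using hjn,
      by simpa [pvKey] using hlook i hi0 (by omega), by simpa [pvKey] using hlook j (by omega) hjn⟩
  · rintro ⟨hmem, h0, hij, hjn, hv1, hv2⟩
    refine ⟨t.1, ⟨h0, by omega⟩, t.2.1, ⟨⟨by omega, hjn⟩, ?_⟩, ?_⟩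
    · have hk : pvKey row field_names t.1 t.2.1 = t := by
        simp [pvKey, pvVal, hv1, hv2]
      rw [hk]; exact hmem
    · simp [pvKey, pvVal, hv1, hv2]

-- ===== VERDICT (by name: the statement is the Claim_ definition above) =====
theorem pairs_covered_by_row_py_spec : Claim_equal_pairs_covered_by_row_py := by
  intro row field_names uncovered _ hpre
  unfold Spec_pairs_covered_by_row_py
  rw [pvA_eq_length, pvB_eq_length]
  congr 1
  exact List.Perm.length_eq ((List.perm_ext_iff_of_nodup (pvCov_nodup row field_names uncovered)
    ((PySem.Set.nodup_ofList uncovered).filter _)).2 (pvMem_equiv row field_names uncovered hpre))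

@[simp]
theorem pairs_covered_by_row_py_raises : Claim_raises_pairs_covered_by_row_py := by
  unfold Claim_raises_pairs_covered_by_row_py
  exact ⟨by
    intro row field_names uncovered _ hr hpre
    rcases hr with ⟨h2, s, hs, hnone⟩
    rcases hpre with h1 | hall
    · omega
    · have := hall s hs
      rw [hnone] at this
      simp at this, by decide⟩
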